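-- pv_equiv track=rewrite | github.com/JAEKWANG97/Backjoon | Class3/20529.py | cal_gap
-- ===== SOURCE A (Python) =====
-- def cal_gap(mbti1, mbti2, mbti3):
--     gap = 0
--     for i in range(4):
--         if mbti1[i] != mbti2[i]:
--             gap += 1
--         if mbti1[i] != mbti3[i]:
--             gap += 1
--         if mbti2[i] != mbti3[i]:
--             gap += 1
--     return gap
-- ===== SOURCE B (Python) =====
-- def cal_gap(mbti1, mbti2, mbti3):
--     # Per column, the number of unequal pairs among three letters is determined
--     # by how many distinct letters the column holds: 1 -> 0, 2 -> 2, 3 -> 3.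
--     table = {1: 0, 2: 2, 3: 3}
--     return sum(table[len({mbti1[i], mbti2[i], mbti3[i]})] for i in range(4))
-- ===== Notes on version B (the rewrite author's own statement) =====
-- stated objective: alternative
-- what changed: Instead of testing the three pairwise inequalities per position, B builds the set of the three letters in each column and maps its cardinality through a lookup table {1:0, 2:2, 3:3} (distinct-count characterisation of the pairwise-difference count), summing over the four columns.
import Mathlib
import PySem

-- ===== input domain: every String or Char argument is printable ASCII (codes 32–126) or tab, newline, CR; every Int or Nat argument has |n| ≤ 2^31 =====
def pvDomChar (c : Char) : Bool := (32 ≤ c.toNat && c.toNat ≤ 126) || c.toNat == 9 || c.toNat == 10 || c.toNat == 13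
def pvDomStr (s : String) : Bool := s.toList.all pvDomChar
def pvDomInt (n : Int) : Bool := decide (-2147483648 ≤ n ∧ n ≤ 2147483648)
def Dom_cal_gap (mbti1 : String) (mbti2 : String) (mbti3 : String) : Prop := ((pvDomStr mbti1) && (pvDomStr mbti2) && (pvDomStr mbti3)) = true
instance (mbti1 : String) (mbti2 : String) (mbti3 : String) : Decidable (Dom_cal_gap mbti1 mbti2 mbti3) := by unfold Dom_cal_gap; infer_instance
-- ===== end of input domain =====

-- B replaces A's three pairwise comparisons per position with a per-column distinct-letter count mapped through a lookup table {1:0,2:2,3:3} (alternative decomposition; same cost).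


-- ===== PORT A =====
def cal_gap (mbti1 : String) (mbti2 : String) (mbti3 : String) : Int :=
  -- literal port of A: one pass over range(4), three ifs per index, mutable counter gap.
  -- pyGet? returning none (Python IndexError on a short string) is excluded by Pre_cal_gap;
  -- .getD ' ' is the total stand-in there.
  (PySem.List.pyRange 0 4 1).foldl (fun gap i =>
    let c1 := (PySem.List.pyGet? mbti1.toList i).getD ' '
    let c2 := (PySem.List.pyGet? mbti2.toList i).getD ' '
    let c3 := (PySem.List.pyGet? mbti3.toList i).getD ' '
    let gap := if c1 != c2 then gap + 1 else gap
    let gap := if c1 != c3 then gap + 1 else gap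
    if c2 != c3 then gap + 1 else gap) 0

-- ===== PORT B =====
-- the table {1: 0, 2: 2, 3: 3} of Source B, as a PySem.Dict
def pvTable : PySem.Dict Int Int := PySem.Dict.ofList [(1, 0), (2, 2), (3, 3)]

def cal_gap_alt (mbti1 : String) (mbti2 : String) (mbti3 : String) : Int :=
  -- port of B: per column i, the set of the three letters; table[len(set)] summed over range(4).
  -- table[k] raises KeyError only for k ∉ {1,2,3}, which never occurs (the set has 1–3 elements);
  -- .getD 0 is the total stand-in. pyGet? none (IndexError) excluded by Pre_cal_gap.
  ((PySem.List.pyRange 0 4 1).map (fun i =>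
    let s : PySem.Set Char := PySem.Set.ofList
      [(PySem.List.pyGet? mbti1.toList i).getD ' ',
       (PySem.List.pyGet? mbti2.toList i).getD ' ',
       (PySem.List.pyGet? mbti3.toList i).getD ' ']
    (PySem.Dict.get? pvTable (PySem.Set.len s)).getD 0)).sum

-- ===== PRECONDITION & SPEC =====
-- Pre_: the Python A raises IndexError unless every string has at least 4 characters.
def Pre_cal_gap (mbti1 : String) (mbti2 : String) (mbti3 : String) : Prop :=
  4 ≤ mbti1.toList.length ∧ 4 ≤ mbti2.toList.length ∧ 4 ≤ mbti3.toList.length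
instance (mbti1 : String) (mbti2 : String) (mbti3 : String) : Decidable (Pre_cal_gap mbti1 mbti2 mbti3) := by unfold Pre_cal_gap; infer_instance
def pvWitness_cal_gap : String × String × String := ("ENFP", "ISTJ", "ENTJ")

def Spec_cal_gap (mbti1 : String) (mbti2 : String) (mbti3 : String) (out : Int) : Prop := out = cal_gap_alt mbti1 mbti2 mbti3
instance (mbti1 : String) (mbti2 : String) (mbti3 : String) (out : Int) : Decidable (Spec_cal_gap mbti1 mbti2 mbti3 out) := by unfold Spec_cal_gap; infer_instance

-- ===== CLAIM =====
def Claim_equal_cal_gap : Prop := ∀ (mbti1 : String) (mbti2 : String) (mbti3 : String), Dom_cal_gap mbti1 mbti2 mbti3 → Pre_cal_gap mbti1 mbti2 mbti3 → Spec_cal_gap mbti1 mbti2 mbti3 (cal_gap mbti1 mbti2 mbti3)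

-- ===== LEMMAS AND PROOFS =====

-- per-column characterisation: the table value at the distinct-letter count equals
-- the number of unequal pairs among the three letters
-- closed-form values of the table lookups
theorem pvT1 : (PySem.Dict.get? pvTable 1).getD 0 = 0 := by decide
theorem pvT2 : (PySem.Dict.get? pvTable 2).getD 0 = 2 := by decide
theorem pvT3 : (PySem.Dict.get? pvTable 3).getD 0 = 3 := by decide

-- per-column characterisation: the table value at the distinct-letter count equals
-- the number of unequal pairs among the three letters
theorem pvCol (a b c : Char) :
    (PySem.Dict.get? pvTable (PySem.Set.len (PySem.Set.ofList [a, b, c]))).getD 0 =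
      (if a != b then (1 : Int) else 0) + (if a != c then 1 else 0) + (if b != c then 1 else 0) := by
  by_cases hab : a = b
  · subst hab
    by_cases hbc : a = c
    · subst hbc
      have hs : PySem.Set.ofList [a, a, a] = [a] := by
        simp [PySem.Set.ofList, PySem.Set.add, PySem.Set.contains]
      simp [PySem.Set.len, hs, pvT1]
    · have hcb : ¬ c = a := fun h => hbc h.symm
      have hs : PySem.Set.ofList [a, a, c] = [a, c] := by
        simp [PySem.Set.ofList, PySem.Set.add, PySem.Set.contains, hcb]
      simp [PySem.Set.len, hs, pvT2, hbc]
  · have hba : ¬ b = a := fun h => hab h.symm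
    by_cases hac : a = c
    · subst hac
      have hs : PySem.Set.ofList [a, b, a] = [a, b] := by
        simp [PySem.Set.ofList, PySem.Set.add, PySem.Set.contains, hba]
      simp [PySem.Set.len, hs, pvT2, hab, hba]
    · have hca : ¬ c = a := fun h => hac h.symm
      by_cases hbc : b = c
      · subst hbc
        have hs : PySem.Set.ofList [a, b, b] = [a, b] := by
          simp [PySem.Set.ofList, PySem.Set.add, PySem.Set.contains, hba]
        simp [PySem.Set.len, hs, pvT2, hab]
      · have hcb : ¬ c = b := fun h => hbc h.symm
        have hs : PySem.Set.ofList [a, b, c] = [a, b, c] := by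
          simp [PySem.Set.ofList, PySem.Set.add, PySem.Set.contains, hba, hca, hcb]
        simp [PySem.Set.len, hs, pvT3, hab, hac, hbc]

-- ===== VERDICT =====
set_option maxHeartbeats 1000000 in
theorem cal_gap_spec : Claim_equal_cal_gap := by
  intro mbti1 mbti2 mbti3 _ _
  have hstep : ∀ (c : Bool) (x : Int), (if c = true then x + 1 else x) = x + (if c = true then 1 else 0) := by
    intro c x; cases c <;> simp
  unfold Spec_cal_gap cal_gap cal_gap_alt
  have h4 : PySem.List.pyRange 0 4 1 = [0, 1, 2, 3] := by decide
  rw [h4]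
  simp only [List.foldl_cons, List.foldl_nil, List.map_cons, List.map_nil,
    List.sum_cons, List.sum_nil, hstep, pvCol]
  ring
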